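-- pv_equiv track=rewrite | github.com/Trikdis-UAB/manuals | Scripts/compare_manuals.py | find_orphaned_notes
-- ===== SOURCE A (Python) =====
-- from typing import Dict, List, Tuple
--
-- def find_orphaned_notes(lines: List[str]) -> List[str]:
--     issues = []
--     for idx, line in enumerate(lines):
--         if line.strip() != "> [!NOTE]":
--             continue
--         j = idx + 1
--         while j < len(lines) and not lines[j].strip():
--             j += 1
--         if j >= len(lines):
--             issues.append(line)
--             continue
--         if lines[j].startswith("#"):
--             issues.append(f"{line} -> {lines[j]}")
--     return issues
-- ===== SOURCE B (Python) =====
-- def find_orphaned_notes(lines):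
--     matches = []
--     next_nb = None  # nearest non-blank line strictly after the current one (None = EOF)
--     for line in reversed(lines):
--         if line.strip() == "> [!NOTE]":
--             if next_nb is None:
--                 matches.append(line)
--             elif next_nb.startswith("#"):
--                 matches.append(f"{line} -> {next_nb}")
--         if line.strip():
--             next_nb = line
--     matches.reverse()
--     return matches
-- ===== Notes on version B (the rewrite author's own statement) =====
-- stated objective: alternative
-- what changed: Replaced the forward scan with a per-NOTE inner while-loop that re-skips blank runs by a single reverse pass that carries the nearest following non-blank line, so the inner scan disappears.
import Mathlib
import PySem

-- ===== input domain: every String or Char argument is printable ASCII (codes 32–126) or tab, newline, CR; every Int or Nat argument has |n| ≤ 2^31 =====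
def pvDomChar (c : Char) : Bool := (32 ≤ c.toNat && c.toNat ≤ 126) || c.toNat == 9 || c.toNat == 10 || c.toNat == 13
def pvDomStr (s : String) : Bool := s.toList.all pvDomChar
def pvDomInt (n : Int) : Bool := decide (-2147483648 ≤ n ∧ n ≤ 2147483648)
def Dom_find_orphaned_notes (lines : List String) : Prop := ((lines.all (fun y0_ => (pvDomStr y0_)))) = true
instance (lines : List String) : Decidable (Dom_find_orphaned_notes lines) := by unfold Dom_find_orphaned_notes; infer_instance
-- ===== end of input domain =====

-- B replaces A's forward scan with a per-NOTE inner blank-skipping while-loop by one reverse pass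
-- carrying the nearest following non-blank line (objective: alternative decomposition).

-- ===== PORT A =====
-- the inner 'while j < len(lines) and not lines[j].strip(): j += 1' loop of A
def pvWhileBlank (lines : List String) (j : Nat) : Nat :=
  if h : j < lines.length then
    if PySem.Str.strip lines[j] == "" then pvWhileBlank lines (j + 1) else j
  else j
termination_by lines.length - j

-- 'for idx, line in enumerate(lines)': indices are the nonnegative 0,1,2,…, ported with Nat via zipIdx
def find_orphaned_notes (lines : List String) : List String :=
  (lines.zipIdx 0).foldl
    (fun issues p =>
      let line := p.1
      let idx := p.2
      if PySem.Str.strip line != "> [!NOTE]" then issues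
      else
        let j := pvWhileBlank lines (idx + 1)
        if lines.length ≤ j then issues ++ [line]
        else if PySem.Str.startswith (lines.getD j "") "#" then
          issues ++ [line ++ " -> " ++ lines.getD j ""]
        else issues)
    []

-- ===== PORT B =====
-- one step of B's reverse loop; state = (next_nb, matches)
def pvStepB (st : Option String × List String) (line : String) : Option String × List String :=
  let st1 :=
    if PySem.Str.strip line == "> [!NOTE]" then
      match st.1 with
      | none => (st.1, st.2 ++ [line])
      | some nb =>
        if PySem.Str.startswith nb "#" then (st.1, st.2 ++ [line ++ " -> " ++ nb]) else st
    else st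
  if PySem.Str.strip line != "" then (some line, st1.2) else st1

def find_orphaned_notes_alt (lines : List String) : List String :=
  ((lines.reverse.foldl pvStepB (none, [])).2).reverse

-- ===== PRECONDITION & SPEC =====
def Spec_find_orphaned_notes (lines : List String) (out : List String) : Prop := out = find_orphaned_notes_alt lines
instance (lines : List String) (out : List String) : Decidable (Spec_find_orphaned_notes lines out) := by unfold Spec_find_orphaned_notes; infer_instance

-- ===== CLAIM (what is proved, stated in full; the proofs are below) =====
def Claim_equal_find_orphaned_notes : Prop := ∀ (lines : List String), Dom_find_orphaned_notes lines → Spec_find_orphaned_notes lines (find_orphaned_notes lines)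

-- ===== LEMMAS AND PROOFS =====

-- the non-blank test shared by both programs
def pvNB (s : String) : Bool := PySem.Str.strip s != ""

-- common reference function: per line, the issue it contributes given its tail
def pvGSpec : List String → List String
  | [] => []
  | l :: rest =>
    (if PySem.Str.strip l == "> [!NOTE]" then
      match rest.find? pvNB with
      | none => [l]
      | some nb => if PySem.Str.startswith nb "#" then [l ++ " -> " ++ nb] else []
     else []) ++ pvGSpec rest

-- A's inner while-loop finds exactly the first non-blank of lines.drop j (or runs off the end)
theorem pvWhileBlank_spec (lines : List String) (j : Nat) :
    (match (lines.drop j).find? pvNB with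
     | none => lines.length ≤ pvWhileBlank lines j
     | some nb => pvWhileBlank lines j < lines.length ∧
         lines.getD (pvWhileBlank lines j) "" = nb) := by
  by_cases h : j < lines.length
  · rw [List.drop_eq_getElem_cons h, List.find?_cons]
    by_cases hb : PySem.Str.strip lines[j] = ""
    · have hp : pvNB lines[j] = false := by simp [pvNB, hb]
      rw [hp]
      rw [show pvWhileBlank lines j = pvWhileBlank lines (j + 1) by
        rw [pvWhileBlank]; simp [h, hb]]
      exact pvWhileBlank_spec lines (j + 1)
    · have hp : pvNB lines[j] = true := by simp [pvNB, hb]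
      rw [hp]
      have hw : pvWhileBlank lines j = j := by
        rw [pvWhileBlank]; simp [h, hb]
      simp [hw, h, List.getD_eq_getElem?_getD]
  · have hd : lines.drop j = [] := List.drop_eq_nil_of_le (by omega)
    have hw : pvWhileBlank lines j = j := by rw [pvWhileBlank]; simp [h]
    simp [hd, hw]
    omega
termination_by lines.length - j

-- A's per-line contribution, extracted
def pvOutA (lines : List String) (idx : Nat) (line : String) : List String :=
  if PySem.Str.strip line != "> [!NOTE]" then []
  else
    let j := pvWhileBlank lines (idx + 1)
    if lines.length ≤ j then [line]
    else if PySem.Str.startswith (lines.getD j "") "#" then [line ++ " -> " ++ lines.getD j ""]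
    else []

theorem pvOutA_eq (lines : List String) (idx : Nat) (line : String)
    (h : lines.drop (idx + 1) = rest) :
    pvOutA lines idx line =
      (if PySem.Str.strip line == "> [!NOTE]" then
        match rest.find? pvNB with
        | none => [line]
        | some nb => if PySem.Str.startswith nb "#" then [line ++ " -> " ++ nb] else []
       else []) := by
  have hw := pvWhileBlank_spec lines (idx + 1)
  rw [h] at hw
  by_cases hm : PySem.Str.strip line = "> [!NOTE]"
  · cases hf : rest.find? pvNB with
    | none =>
        rw [hf] at hw
        simp [pvOutA, hm, hw]
    | some nb =>
        rw [hf] at hw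
        have h2 : lines[pvWhileBlank lines (idx + 1)]?.getD "" = nb := by
          have := hw.2
          rwa [List.getD_eq_getElem?_getD] at this
        simp [pvOutA, hm, Nat.not_le.mpr hw.1, h2]
  · simp [pvOutA, hm]

-- A's fold, seen over the suffix being enumerated, equals pvGSpec
theorem pvA_suffix (lines : List String) :
    ∀ (suf : List String) (k : Nat), suf = lines.drop k →
      (suf.zipIdx k).flatMap (fun p => pvOutA lines p.2 p.1) = pvGSpec suf := by
  intro suf
  induction suf with
  | nil => intro k _; simp [pvGSpec]
  | cons x rest ih =>
      intro k hk
      have hlt : k < lines.length := by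
        by_contra hge
        rw [List.drop_eq_nil_of_le (by omega)] at hk
        exact List.cons_ne_nil x rest hk
      have hrest : rest = lines.drop (k + 1) := by
        rw [List.drop_eq_getElem_cons hlt] at hk
        have := congrArg List.tail hk
        simpa using this
      rw [List.zipIdx_cons, List.flatMap_cons, ih (k + 1) hrest,
        pvOutA_eq lines k x hrest.symm]
      rfl

theorem pvA_eq_gSpec (lines : List String) : find_orphaned_notes lines = pvGSpec lines := by
  unfold find_orphaned_notes
  have hbody : ∀ (issues : List String) (p : String × Nat),
      (fun issues (p : String × Nat) =>
        let line := p.1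
        let idx := p.2
        if PySem.Str.strip line != "> [!NOTE]" then issues
        else
          let j := pvWhileBlank lines (idx + 1)
          if lines.length ≤ j then issues ++ [line]
          else if PySem.Str.startswith (lines.getD j "") "#" then
            issues ++ [line ++ " -> " ++ lines.getD j ""]
          else issues) issues p = issues ++ pvOutA lines p.2 p.1 := by
    intro issues p
    simp only [pvOutA]
    split_ifs <;> simp
  calc (lines.zipIdx 0).foldl
        (fun issues p =>
          let line := p.1
          let idx := p.2
          if PySem.Str.strip line != "> [!NOTE]" then issues
          else
            let j := pvWhileBlank lines (idx + 1)
            if lines.length ≤ j then issues ++ [line]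
            else if PySem.Str.startswith (lines.getD j "") "#" then
              issues ++ [line ++ " -> " ++ lines.getD j ""]
            else issues) []
      = (lines.zipIdx 0).foldl (fun issues p => issues ++ pvOutA lines p.2 p.1) [] := by
        exact PySem.List.foldl_congr_mem _ _ _ _ (fun issues p _ => hbody issues p)
    _ = [] ++ (lines.zipIdx 0).flatMap (fun p => pvOutA lines p.2 p.1) :=
        PySem.List.foldl_append_eq_flatMap ..
    _ = pvGSpec lines := by
        rw [List.nil_append]
        exact pvA_suffix lines lines 0 (by simp)

-- B's reverse fold carries (first non-blank of the suffix, reversed pvGSpec of the suffix)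
theorem pvB_foldr (lines : List String) :
    lines.foldr (fun x st => pvStepB st x) (none, []) =
      (lines.find? pvNB, (pvGSpec lines).reverse) := by
  induction lines with
  | nil => rfl
  | cons l rest ih =>
      rw [List.foldr_cons, ih]
      by_cases hm : PySem.Str.strip l = "> [!NOTE]"
      · have hnb : pvNB l = true := by simp [pvNB, hm]
        cases hf : rest.find? pvNB with
        | none =>
            simp [pvStepB, hm, pvGSpec, hf, hnb]
        | some nb =>
            by_cases hh : PySem.Chars.startswith nb.toList ['#'] = true
            · simp [pvStepB, hm, pvGSpec, hf, hnb, hh]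
            · simp [pvStepB, hm, pvGSpec, hf, hnb, hh]
      · by_cases hb : PySem.Str.strip l = ""
        · have hnb : pvNB l = false := by simp [pvNB, hb]
          simp [pvStepB, hb, pvGSpec, hnb]
        · have hnb : pvNB l = true := by simp [pvNB, hb]
          simp [pvStepB, hm, hb, pvGSpec, hnb]

theorem pvB_eq_gSpec (lines : List String) : find_orphaned_notes_alt lines = pvGSpec lines := by
  unfold find_orphaned_notes_alt
  rw [List.foldl_reverse]
  rw [pvB_foldr]
  simp

-- ===== VERDICT (by name: the statement is the Claim_ definition above) =====
theorem find_orphaned_notes_spec : Claim_equal_find_orphaned_notes := by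
  intro lines _
  unfold Spec_find_orphaned_notes
  rw [pvA_eq_gSpec, pvB_eq_gSpec]
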